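-- pv_equiv track=rewrite | github.com/cyberklin/adventofcode | 2024/day21/21_2.py | split_code_to_words
-- ===== SOURCE A (Python) =====
-- def split_code_to_words(code):
--     words = []
--     buf = ''
--     for char in code:
--         buf += char
--         if char == 'A':
--             words.append(buf)
--             buf = ''
--     if buf:
--         words.append(buf)
--     return words
-- ===== SOURCE B (Python) =====
-- def split_code_to_words(code):
--     parts = code.split('A')
--     words = [p + 'A' for p in parts[:-1]]
--     if parts[-1]:
--         words.append(parts[-1])
--     return words
-- ===== Notes on version B (the rewrite author's own statement) =====
-- stated objective: faster
-- what changed: Replaces the character-by-character accumulator loop with a single C-level str.split pass on the separator character, a comprehension re-attaching the separator to each non-final part, and a check on the trailing part.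
import Mathlib
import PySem

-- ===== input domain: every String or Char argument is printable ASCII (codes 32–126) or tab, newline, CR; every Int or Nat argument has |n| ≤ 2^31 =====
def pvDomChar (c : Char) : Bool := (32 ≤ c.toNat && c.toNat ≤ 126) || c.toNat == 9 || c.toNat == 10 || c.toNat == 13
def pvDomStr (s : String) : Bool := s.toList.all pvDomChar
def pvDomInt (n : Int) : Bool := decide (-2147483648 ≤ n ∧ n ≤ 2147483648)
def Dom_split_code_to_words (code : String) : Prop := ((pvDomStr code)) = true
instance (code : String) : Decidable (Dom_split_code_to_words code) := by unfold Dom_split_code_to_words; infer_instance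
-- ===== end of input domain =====

-- B replaces A's character-by-character accumulator loop with one str.split pass on the
-- separator plus a comprehension re-attaching it (measured faster by a constant factor).
-- Both ports work on List Char and apply String.ofList at the end (exact: Python str ↔ its code points).

-- ===== PORT A =====
-- A's loop over code, state = (words, buf); buf += char, flush on 'A', flush leftover.
def split_code_to_words (code : String) : List String :=
  (let st := code.toList.foldl
      (fun (st : List (List Char) × List Char) c =>
        let buf := st.2 ++ [c]
        if c = 'A' then (st.1 ++ [buf], []) else (st.1, buf))
      ([], [])
   if st.2 ≠ [] then st.1 ++ [st.2] else st.1).map String.ofList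

-- ===== PORT B =====
-- parts = code.split('A'); words = [p + 'A' for p in parts[:-1]]; if parts[-1]: words.append(parts[-1])
def split_code_to_words_alt (code : String) : List String :=
  (let parts := PySem.Chars.splitOn code.toList ['A']
   let words := (PySem.List.slice parts none (some (-1))).map (· ++ ['A'])
   match PySem.List.pyGet? parts (-1) with
   | some last => if last ≠ [] then words ++ [last] else words
   | none => words).map String.ofList

-- ===== PRECONDITION & SPEC =====
def Spec_split_code_to_words (code : String) (out : List String) : Prop := out = split_code_to_words_alt code
instance (code : String) (out : List String) : Decidable (Spec_split_code_to_words code out) := by unfold Spec_split_code_to_words; infer_instance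

-- ===== CLAIM (what is proved, stated in full; the proofs are below) =====
def Claim_equal_split_code_to_words : Prop := ∀ (code : String), Dom_split_code_to_words code → Spec_split_code_to_words code (split_code_to_words code)

-- ===== LEMMAS AND PROOFS =====

/-- Simple recursive form of splitting on the single char 'A'. -/
def pvParts (pre : List Char) : List Char → List (List Char)
  | [] => [pre]
  | c :: r => if c = 'A' then pre :: pvParts [] r else pvParts (pre ++ [c]) r

theorem pvParts_ne_nil (pre : List Char) (l : List Char) : pvParts pre l ≠ [] := by
  induction l generalizing pre with
  | nil => simp [pvParts]
  | cons c r ih =>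
    by_cases h : c = 'A'
    · simp [pvParts, h]
    · simp only [pvParts, if_neg h]; exact ih _

theorem splitOn_go_eq (l : List Char) : ∀ (fuel : Nat) (cur : List Char) (acc : List (List Char)),
    l.length ≤ fuel →
    PySem.Chars.splitOn.go ['A'] fuel l cur acc = acc.reverse ++ pvParts cur.reverse l := by
  induction l with
  | nil =>
    intro fuel cur acc _
    cases fuel <;> simp [PySem.Chars.splitOn.go, pvParts]
  | cons c r ih =>
    intro fuel cur acc hf
    cases fuel with
    | zero => simp at hf
    | succ fuel =>
      by_cases h : c = 'A'
      · subst h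
        rw [show PySem.Chars.splitOn.go ['A'] (fuel+1) ('A' :: r) cur acc
            = PySem.Chars.splitOn.go ['A'] fuel r [] (cur.reverse :: acc) by
          simp [PySem.Chars.splitOn.go, List.isPrefixOf]]
        rw [ih fuel [] (cur.reverse :: acc) (by simpa using hf)]
        simp [pvParts]
      · have hb : ('A' == c) = false := by simp [Ne.symm h]
        rw [show PySem.Chars.splitOn.go ['A'] (fuel+1) (c :: r) cur acc
            = PySem.Chars.splitOn.go ['A'] fuel r (c :: cur) acc by
          simp [PySem.Chars.splitOn.go, List.isPrefixOf, hb]]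
        rw [ih fuel (c :: cur) acc (by simpa using Nat.le_of_succ_le_succ hf)]
        simp [pvParts, h]

theorem splitOn_eq (l : List Char) :
    PySem.Chars.splitOn l ['A'] = pvParts [] l := by
  have := splitOn_go_eq l (l.length + 1) [] [] (by omega)
  simpa [PySem.Chars.splitOn] using this

/-- Recursive form of A's loop starting from buffer `buf`. -/
def pvTok (buf : List Char) : List Char → (List (List Char) × List Char)
  | [] => ([], buf)
  | c :: r =>
    if c = 'A' then
      let p := pvTok [] r
      ((buf ++ [c]) :: p.1, p.2)
    else pvTok (buf ++ [c]) r

theorem foldl_eq_pvTok (l : List Char) : ∀ (ws : List (List Char)) (buf : List Char),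
    l.foldl
      (fun (st : List (List Char) × List Char) c =>
        let b := st.2 ++ [c]
        if c = 'A' then (st.1 ++ [b], []) else (st.1, b))
      (ws, buf)
    = (ws ++ (pvTok buf l).1, (pvTok buf l).2) := by
  induction l with
  | nil => intro ws buf; simp [pvTok]
  | cons c r ih =>
    intro ws buf
    by_cases h : c = 'A'
    · subst h
      simp only [List.foldl_cons]
      rw [ih]
      simp [pvTok]
    · simp only [List.foldl_cons, if_neg h]
      rw [ih]
      simp [pvTok, h]

theorem pvTok_eq_parts (l : List Char) : ∀ (pre : List Char),
    pvTok pre l = ((pvParts pre l).dropLast.map (· ++ ['A']),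
                   (pvParts pre l).getLast (pvParts_ne_nil pre l)) := by
  induction l with
  | nil => intro pre; simp [pvTok, pvParts]
  | cons c r ih =>
    intro pre
    by_cases h : c = 'A'
    · subst h
      have hne := pvParts_ne_nil ([] : List Char) r
      simp only [pvTok, pvParts, ih, if_pos]
      simp [List.dropLast_cons_of_ne_nil hne, List.getLast_cons hne]

    · simp only [pvTok, if_neg h, pvParts, ih]

-- ===== VERDICT (by name: the statement is the Claim_ definition above) =====
theorem split_code_to_words_spec : Claim_equal_split_code_to_words := by
  intro code _
  unfold Spec_split_code_to_words split_code_to_words split_code_to_words_alt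
  rw [splitOn_eq, foldl_eq_pvTok, pvTok_eq_parts]
  have hne := pvParts_ne_nil ([] : List Char) code.toList
  simp only [PySem.List.slice_to_neg_one, PySem.List.pyGet?_neg_one,
    List.getLast?_eq_getLast_of_ne_nil hne]
  simp
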